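-- pv_equiv track=rewrite | github.com/JasperHG90/memex | packages/core/src/memex_core/memory/extraction/core.py | _find_split_points_in_code
-- ===== SOURCE A (Python) =====
-- def _find_split_points_in_code(text: str, start: int, end: int) -> list[int]:
--     """Find blank lines within a code block for potential splitting."""
--     points: list[int] = []
--     i = start
--     first_line = True
--     while i < end:
--         line_end = text.find('\n', i)
--         if line_end == -1 or line_end >= end:
--             break
--         line = text[i:line_end]
--         if not first_line and not line.strip():
--             points.append(line_end + 1)
--         first_line = False
--         i = line_end + 1
--     return points
-- ===== SOURCE B (Python) =====
-- def _find_split_points_in_code(text: str, start: int, end: int) -> list[int]: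
--     """Find blank lines within a code block for potential splitting."""
--     newlines = []
--     j = text.find('\n', start)
--     while j != -1 and j < end:
--         newlines.append(j)
--         j = text.find('\n', j + 1)
--     return [b + 1
--             for a, b in zip(newlines, newlines[1:])
--             if not text[a + 1:b].strip()]
-- ===== Notes on version B (the rewrite author's own statement) =====
-- stated objective: simpler
-- what changed: A's single stateful while loop (index/first_line-flag bookkeeping with the blank-line test interleaved) is replaced by a two-phase decomposition: first collect the newline positions in range, then one comprehension over consecutive newline pairs keeping those whose enclosed line strips to empty.
import Mathlib
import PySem

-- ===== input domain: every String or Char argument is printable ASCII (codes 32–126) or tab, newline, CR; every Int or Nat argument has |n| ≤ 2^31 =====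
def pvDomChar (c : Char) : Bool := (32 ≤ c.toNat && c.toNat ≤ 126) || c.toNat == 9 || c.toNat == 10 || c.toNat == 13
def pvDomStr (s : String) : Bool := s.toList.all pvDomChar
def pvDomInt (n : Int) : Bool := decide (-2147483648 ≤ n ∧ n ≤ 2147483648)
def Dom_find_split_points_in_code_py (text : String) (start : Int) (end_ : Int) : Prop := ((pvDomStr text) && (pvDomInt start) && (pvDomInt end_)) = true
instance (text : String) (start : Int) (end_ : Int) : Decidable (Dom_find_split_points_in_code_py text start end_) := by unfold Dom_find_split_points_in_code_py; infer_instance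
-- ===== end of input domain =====

-- B replaces A's stateful while loop (first_line flag, blank test interleaved with scanning) by a
-- two-phase decomposition: collect the newline positions in range, then keep the consecutive pairs
-- whose enclosed line strips to empty (objective: simpler).

-- ===== PORT A =====
-- A's while loop; the fuel only makes the recursion total (each round consumes one newline,
-- so text.length + 2 rounds are never exhausted)
def pvALoop (cs : List Char) (end_ : Int) : Nat → Int → Bool → List Int → List Int
  | 0, _, _, points => points
  | fuel + 1, i, first_line, points =>
    if i < end_ then
      let line_end := PySem.Chars.findFrom cs ['\n'] i none
      if line_end = -1 ∨ end_ ≤ line_end then points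
      else
        let line := PySem.Chars.slice cs (some i) (some line_end)
        let points' := if first_line = false ∧ PySem.Chars.strip line = [] then points ++ [line_end + 1] else points
        pvALoop cs end_ fuel (line_end + 1) false points'
    else points

def find_split_points_in_code_py (text : String) (start : Int) (end_ : Int) : List Int :=
  pvALoop text.toList end_ (text.toList.length + 2) start true []

-- ===== PORT B =====
-- B's collection loop: j = text.find('\n', start); while j != -1 and j < end: append j; j = find('\n', j+1)
-- (the fuel only makes the recursion total: j strictly increases, so text.length + 2 rounds suffice)
def pvCollect (cs : List Char) (end_ : Int) : Nat → Int → List Int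
  | 0, _ => []
  | fuel + 1, j0 =>
    let j := PySem.Chars.findFrom cs ['\n'] j0 none
    if j ≠ -1 ∧ j < end_ then j :: pvCollect cs end_ fuel (j + 1) else []

-- [b + 1 for a, b in zip(newlines, newlines[1:]) if not text[a + 1:b].strip()]
def pvPairs (cs : List Char) (ns : List Int) : List Int :=
  ((ns.zip (PySem.List.slice ns (some 1) none)).filter
      (fun ab => decide (PySem.Chars.strip (PySem.Chars.slice cs (some (ab.1 + 1)) (some ab.2)) = []))).map
    (fun ab => ab.2 + 1)

def find_split_points_in_code_py_alt (text : String) (start : Int) (end_ : Int) : List Int :=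
  pvPairs text.toList (pvCollect text.toList end_ (text.toList.length + 2) start)

-- ===== PRECONDITION & SPEC =====
def Spec_find_split_points_in_code_py (text : String) (start : Int) (end_ : Int) (out : List Int) : Prop := out = find_split_points_in_code_py_alt text start end_
instance (text : String) (start : Int) (end_ : Int) (out : List Int) : Decidable (Spec_find_split_points_in_code_py text start end_ out) := by unfold Spec_find_split_points_in_code_py; infer_instance

-- ===== CLAIM (what is proved, stated in full; the proofs are below) =====
def Claim_equal_find_split_points_in_code_py : Prop := ∀ (text : String) (start : Int) (end_ : Int), Dom_find_split_points_in_code_py text start end_ → Spec_find_split_points_in_code_py text start end_ (find_split_points_in_code_py text start end_)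

-- ===== LEMMAS AND PROOFS =====

-- proof-side reference: the list of newline positions i with s0 ≤ i < end_
def pvNl (cs : List Char) (s0 end_ : Int) : List Int :=
  ((PySem.List.enumerate cs 0).filter
      (fun p => p.2 == '\n' && decide (s0 ≤ p.1) && decide (p.1 < end_))).map (·.1)

-- reference recursion: walk the newline positions, emitting m + 1 whenever the line from i to m is blank
def pvG (cs : List Char) : Int → List Int → List Int
  | _, [] => []
  | i, m :: t =>
    (if PySem.Chars.strip (PySem.Chars.slice cs (some i) (some m)) = [] then [m + 1] else []) ++
      pvG cs (m + 1) t

theorem pv_mem_enumerate {α : Type} (xs : List α) (s : Int) (i : Int) (c : α) :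
    (i, c) ∈ PySem.List.enumerate xs s ↔ ∃ k : Nat, k < xs.length ∧ i = s + k ∧ xs[k]? = some c := by
  induction xs generalizing s with
  | nil => simp [PySem.List.enumerate]
  | cons x xs ih =>
    simp only [PySem.List.enumerate_cons, List.mem_cons, ih, Prod.mk.injEq]
    constructor
    · rintro (⟨rfl, rfl⟩ | ⟨k, hk, h1, h2⟩)
      · exact ⟨0, by simp, by simp, by simp⟩
      · exact ⟨k + 1, by simp [hk], by push_cast; omega, by simpa using h2⟩
    · rintro ⟨k, hk, h1, h2⟩
      cases k with
      | zero => simp at h1 h2; exact Or.inl ⟨by omega, h2.symm⟩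
      | succ k =>
        right; exact ⟨k, by simpa using hk, by push_cast at h1 ⊢; omega, by simpa using h2⟩

theorem pv_mem_nl (cs : List Char) (s0 e x : Int) :
    x ∈ pvNl cs s0 e ↔ ∃ k : Nat, x = (k : Int) ∧ k < cs.length ∧ cs[k]? = some '\n' ∧ s0 ≤ x ∧ x < e := by
  simp only [pvNl, List.mem_map, List.mem_filter, Bool.and_eq_true, beq_iff_eq, decide_eq_true_eq]
  constructor
  · rintro ⟨⟨i, c⟩, ⟨hmem, ⟨hc, h1⟩, h2⟩, rfl⟩
    rcases (pv_mem_enumerate cs 0 i c).1 hmem with ⟨k, hk, hik, hget⟩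
    exact ⟨k, by simpa using hik, hk, by simp_all, h1, h2⟩
  · rintro ⟨k, rfl, hk, hget, h1, h2⟩
    exact ⟨⟨(k : Int), '\n'⟩, ⟨(pv_mem_enumerate cs 0 _ _).2 ⟨k, hk, by simp, hget⟩, ⟨rfl, h1⟩, h2⟩, rfl⟩

theorem pv_pairwise_nl (cs : List Char) (s0 e : Int) : (pvNl cs s0 e).Pairwise (· < ·) := by
  have h : ((PySem.List.enumerate cs 0).map (·.1)).Pairwise (· < ·) := by
    rw [PySem.List.map_fst_enumerate]
    exact PySem.List.pairwise_lt_pyRange_one 0 (0 + cs.length)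
  exact h.sublist (List.Sublist.map _ List.filter_sublist)

theorem pv_prefix_drop_iff (cs : List Char) (j : Nat) :
    ['\n'] <+: cs.drop j ↔ cs[j]? = some '\n' := by
  rw [← List.head?_drop]
  cases h : cs.drop j with
  | nil => simp
  | cons a t => simp [List.cons_prefix_iff]

theorem pv_infix_of_get (cs : List Char) (k j : Nat) (hjk : k ≤ j) (hget : cs[j]? = some '\n') :
    ['\n'] <:+: cs.drop k := by
  have hmem : '\n' ∈ cs.drop k := by
    apply List.mem_of_getElem? (i := j - k)
    rw [List.getElem?_drop]
    rwa [Nat.add_sub_cancel' hjk]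
  rcases List.append_of_mem hmem with ⟨s, t, hst⟩
  exact ⟨s, t, by simp [hst]⟩

-- no newline position survives the filter when findFrom says -1 or points at or past end_
theorem pv_nl_nil (cs : List Char) (e : Int) (k : Nat) (hk : k ≤ cs.length)
    (h : PySem.Chars.findFrom cs ['\n'] (k : Int) none = -1 ∨
         e ≤ PySem.Chars.findFrom cs ['\n'] (k : Int) none) :
    pvNl cs (k : Int) e = [] := by
  rw [List.eq_nil_iff_forall_not_mem]
  intro x hx
  rcases (pv_mem_nl cs _ e x).1 hx with ⟨j, rfl, hj, hget, h1, h2⟩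
  have hjk : k ≤ j := by exact_mod_cast h1
  rcases h with h | h
  · rw [PySem.Chars.findFrom_natCast_eq_neg_one_iff cs ['\n'] k hk] at h
    exact h (pv_infix_of_get cs k j hjk hget)
  · have hne : PySem.Chars.findFrom cs ['\n'] (k : Int) none ≠ -1 := by
      intro h0
      rw [PySem.Chars.findFrom_natCast_eq_neg_one_iff cs ['\n'] k hk] at h0
      exact h0 (pv_infix_of_get cs k j hjk hget)
    obtain ⟨hkle, -, hmin⟩ := PySem.Chars.findFrom_natCast_spec cs ['\n'] k hk hne
    have hjm : j < (PySem.Chars.findFrom cs ['\n'] (k : Int) none).toNat := by omega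
    exact hmin j hjk hjm ((pv_prefix_drop_iff cs j).2 hget)

-- the first newline at or after k, if it lands before end_, heads the filtered newline list
theorem pv_nl_cons (cs : List Char) (e : Int) (k : Nat) (m : Int)
    (hkm : (k : Int) ≤ m) (hmlen : m.toNat < cs.length)
    (hmget : cs[m.toNat]? = some '\n')
    (hmin : ∀ j : Nat, k ≤ j → j < m.toNat → cs[j]? ≠ some '\n')
    (hlt : m < e) :
    pvNl cs (k : Int) e = m :: pvNl cs (m + 1) e := by
  have hm0 : 0 ≤ m := le_trans (Int.natCast_nonneg k) hkm
  have hpw2 : (m :: pvNl cs (m + 1) e).Pairwise (· < ·) := by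
    refine List.Pairwise.cons (fun b hb => ?_) (pv_pairwise_nl cs _ e)
    rcases (pv_mem_nl cs _ e b).1 hb with ⟨j, rfl, _, _, h1, _⟩
    omega
  have hperm : (pvNl cs (k : Int) e).Perm (m :: pvNl cs (m + 1) e) := by
    rw [List.perm_ext_iff_of_nodup ((pv_pairwise_nl cs _ e).imp ne_of_lt) (hpw2.imp ne_of_lt)]
    intro x
    rw [pv_mem_nl, List.mem_cons, pv_mem_nl]
    constructor
    · rintro ⟨j, rfl, hj, hget, h1, h2⟩
      have hjk : k ≤ j := by exact_mod_cast h1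
      by_cases hxm : (j : Int) = m
      · exact Or.inl hxm
      · right
        have : ¬ j < m.toNat := fun hjm => hmin j hjk hjm hget
        exact ⟨j, rfl, hj, hget, by omega, h2⟩
    · rintro (h | ⟨j, rfl, hj, hget, h1, h2⟩)
      · exact ⟨m.toNat, by omega, hmlen, hmget, by omega, by omega⟩
      · exact ⟨j, rfl, hj, hget, by omega, h2⟩
  exact List.Perm.eq_of_pairwise (fun a b _ _ => le_antisymm)
    ((pv_pairwise_nl cs _ e).imp le_of_lt) (hpw2.imp le_of_lt) hperm

-- s.find(sub, i) for negative i searches from the clamped position len(s) + i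
theorem pv_findFrom_clamp (cs sub : List Char) (i : Int) (h : i < 0) :
    PySem.Chars.findFrom cs sub i none = PySem.Chars.findFrom cs sub (((cs.length : Int) + i).toNat : Int) none := by
  simp only [PySem.Chars.findFrom]
  have h1 : (if i < 0 then if i + (cs.length:Int) < 0 then 0 else i + (cs.length:Int) else i)
      = ((((cs.length:Int) + i).toNat : Int)) := by split_ifs <;> omega
  rw [h1]
  have h2 : (if ((((cs.length:Int) + i).toNat : Int)) < 0 then if ((((cs.length:Int) + i).toNat : Int)) + (cs.length:Int) < 0 then 0 else ((((cs.length:Int) + i).toNat : Int)) + (cs.length:Int) else ((((cs.length:Int) + i).toNat : Int))) = ((((cs.length:Int) + i).toNat : Int)) := by split_ifs <;> omega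
  rw [h2]

-- s.find(sub, i) with a start past len(s) is -1 (CPython rule, kept by PySem)
theorem pv_findFrom_big (cs sub : List Char) (i : Int) (h : (cs.length : Int) < i) :
    PySem.Chars.findFrom cs sub i none = -1 := by
  simp only [PySem.Chars.findFrom]
  have hst : (if i < 0 then if i + (cs.length:Int) < 0 then 0 else i + (cs.length:Int) else i) = i := if_neg (by omega)
  rw [hst, if_pos h]

theorem pv_nl_len_le (cs : List Char) (s0 e : Int) : (pvNl cs s0 e).length ≤ cs.length := by
  simp only [pvNl, List.length_map]
  calc (List.filter _ (PySem.List.enumerate cs 0)).length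
      ≤ (PySem.List.enumerate cs 0).length := List.length_filter_le _ _
    _ = cs.length := PySem.List.length_enumerate cs 0

-- A's loop, once first_line is false, walks exactly the filtered newline list
theorem pv_aLoop_eq_g (cs : List Char) (e : Int) :
    ∀ (fuel : Nat) (k : Nat) (acc : List Int), k ≤ cs.length → (pvNl cs (k : Int) e).length < fuel →
      pvALoop cs e fuel (k : Int) false acc = acc ++ pvG cs (k : Int) (pvNl cs (k : Int) e) := by
  intro fuel
  induction fuel with
  | zero => intro k acc _ hlen; omega
  | succ fuel ih =>
    intro k acc hk hlen
    by_cases hke : (k : Int) < e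
    · by_cases hbm : PySem.Chars.findFrom cs ['\n'] (k : Int) none = -1 ∨
          e ≤ PySem.Chars.findFrom cs ['\n'] (k : Int) none
      · rw [pv_nl_nil cs e k hk hbm]
        simp only [pvALoop, if_pos hke, if_pos hbm, pvG, List.append_nil]
      · have hne : PySem.Chars.findFrom cs ['\n'] (k : Int) none ≠ -1 := fun h => hbm (Or.inl h)
        have hlt : PySem.Chars.findFrom cs ['\n'] (k : Int) none < e := by
          rcases lt_or_ge (PySem.Chars.findFrom cs ['\n'] (k : Int) none) e with h | h
          · exact h
          · exact absurd (Or.inr h) hbm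
        obtain ⟨hkle, hpref, hmin⟩ := PySem.Chars.findFrom_natCast_spec cs ['\n'] k hk hne
        set m := PySem.Chars.findFrom cs ['\n'] (k : Int) none with hmdef
        have hm0 : 0 ≤ m := le_trans (Int.natCast_nonneg k) hkle
        have hmget : cs[m.toNat]? = some '\n' := (pv_prefix_drop_iff cs m.toNat).1 hpref
        have hmlen : m.toNat < cs.length := by
          rcases Nat.lt_or_ge m.toNat cs.length with h | h
          · exact h
          · rw [List.getElem?_eq_none_iff.2 h] at hmget; cases hmget
        have hcons : pvNl cs (k : Int) e = m :: pvNl cs (m + 1) e :=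
          pv_nl_cons cs e k m hkle hmlen hmget
            (fun j hj1 hj2 hget => hmin j hj1 hj2 ((pv_prefix_drop_iff cs j).2 hget)) hlt
        have hm1 : ((m.toNat + 1 : Nat) : Int) = m + 1 := by omega
        have hrec := ih (m.toNat + 1)
          (if PySem.Chars.strip (PySem.Chars.slice cs (some (k : Int)) (some m)) = []
            then acc ++ [m + 1] else acc)
          (by omega)
          (by rw [hm1]; rw [hcons] at hlen; simp only [List.length_cons] at hlen; omega)
        rw [hm1] at hrec
        have hnor : ¬(m = -1 ∨ e ≤ m) := fun hor =>
          Or.elim hor hne (fun hle => absurd hlt (not_lt.2 hle))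
        simp only [pvALoop, if_pos hke, if_neg hnor, ← hmdef]
        simp only [true_and]
        rw [hrec, hcons]
        simp only [pvG]
        split_ifs <;> simp
    · have hnil : pvNl cs (k : Int) e = [] := by
        rw [List.eq_nil_iff_forall_not_mem]
        intro x hx
        rcases (pv_mem_nl cs _ e x).1 hx with ⟨j, rfl, _, _, h1, h2⟩
        omega
      rw [hnil]
      simp only [pvALoop, if_neg hke, pvG, List.append_nil]

-- B's collection loop, started at a nonnegative in-range position, produces the filtered newline list
theorem pv_collect_eq_nl (cs : List Char) (e : Int) :
    ∀ (fuel : Nat) (k : Nat), k ≤ cs.length → (pvNl cs (k : Int) e).length < fuel →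
      pvCollect cs e fuel (k : Int) = pvNl cs (k : Int) e := by
  intro fuel
  induction fuel with
  | zero => intro k _ hlen; omega
  | succ fuel ih =>
    intro k hk hlen
    by_cases hbm : PySem.Chars.findFrom cs ['\n'] (k : Int) none = -1 ∨
        e ≤ PySem.Chars.findFrom cs ['\n'] (k : Int) none
    · have hnc : ¬(PySem.Chars.findFrom cs ['\n'] (k : Int) none ≠ -1 ∧
          PySem.Chars.findFrom cs ['\n'] (k : Int) none < e) := by
        rcases hbm with h | h
        · exact fun hc => hc.1 h
        · exact fun hc => absurd hc.2 (not_lt.2 h)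
      rw [pv_nl_nil cs e k hk hbm]
      simp only [pvCollect, if_neg hnc]
    · have hne : PySem.Chars.findFrom cs ['\n'] (k : Int) none ≠ -1 := fun h => hbm (Or.inl h)
      have hlt : PySem.Chars.findFrom cs ['\n'] (k : Int) none < e := by
        rcases lt_or_ge (PySem.Chars.findFrom cs ['\n'] (k : Int) none) e with h | h
        · exact h
        · exact absurd (Or.inr h) hbm
      obtain ⟨hkle, hpref, hmin⟩ := PySem.Chars.findFrom_natCast_spec cs ['\n'] k hk hne
      set m := PySem.Chars.findFrom cs ['\n'] (k : Int) none with hmdef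
      have hm0 : 0 ≤ m := le_trans (Int.natCast_nonneg k) hkle
      have hmget : cs[m.toNat]? = some '\n' := (pv_prefix_drop_iff cs m.toNat).1 hpref
      have hmlen : m.toNat < cs.length := by
        rcases Nat.lt_or_ge m.toNat cs.length with h | h
        · exact h
        · rw [List.getElem?_eq_none_iff.2 h] at hmget; cases hmget
      have hcons : pvNl cs (k : Int) e = m :: pvNl cs (m + 1) e :=
        pv_nl_cons cs e k m hkle hmlen hmget
          (fun j hj1 hj2 hget => hmin j hj1 hj2 ((pv_prefix_drop_iff cs j).2 hget)) hlt
      have hm1 : ((m.toNat + 1 : Nat) : Int) = m + 1 := by omega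
      have hrec := ih (m.toNat + 1) (by omega)
        (by rw [hm1]; rw [hcons] at hlen; simp only [List.length_cons] at hlen; omega)
      rw [hm1] at hrec
      simp only [pvCollect, ← hmdef, if_pos (And.intro hne hlt)]
      rw [hrec, hcons]

-- the zip-with-tail comprehension over m :: t is the reference recursion started after m
theorem pv_pairs_eq_g (cs : List Char) :
    ∀ (t : List Int) (m : Int), pvPairs cs (m :: t) = pvG cs (m + 1) t := by
  intro t
  induction t with
  | nil => intro m; simp [pvPairs, pvG, PySem.List.slice_from_one]
  | cons t0 t' ih =>
    intro m
    have h := ih t0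
    simp only [pvPairs, PySem.List.slice_from_one, List.tail_cons, List.zip_cons_cons,
      List.filter_cons, pvG] at h ⊢
    split_ifs with hb <;> simp_all

-- one unfolding step of A's loop, with the let-bindings inlined
theorem pvALoop_succ (cs : List Char) (e : Int) (fuel : Nat) (i : Int) (fl : Bool) (pts : List Int) :
    pvALoop cs e (fuel + 1) i fl pts =
      if i < e then
        if PySem.Chars.findFrom cs ['\n'] i none = -1 ∨ e ≤ PySem.Chars.findFrom cs ['\n'] i none then pts
        else
          pvALoop cs e fuel (PySem.Chars.findFrom cs ['\n'] i none + 1) false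
            (if fl = false ∧ PySem.Chars.strip (PySem.Chars.slice cs (some i) (some (PySem.Chars.findFrom cs ['\n'] i none))) = []
              then pts ++ [PySem.Chars.findFrom cs ['\n'] i none + 1] else pts)
      else pts := rfl

-- one unfolding step of B's collection loop
theorem pvCollect_succ (cs : List Char) (e : Int) (fuel : Nat) (j0 : Int) :
    pvCollect cs e (fuel + 1) j0 =
      if PySem.Chars.findFrom cs ['\n'] j0 none ≠ -1 ∧ PySem.Chars.findFrom cs ['\n'] j0 none < e
      then PySem.Chars.findFrom cs ['\n'] j0 none :: pvCollect cs e fuel (PySem.Chars.findFrom cs ['\n'] j0 none + 1)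
      else [] := rfl

-- A's whole run equals the pair scan over the newline list at the clamped start position
theorem pv_main (cs : List Char) (e start : Int) (k0 : Nat) (hk0 : k0 ≤ cs.length)
    (hse : start < e)
    (hfind : PySem.Chars.findFrom cs ['\n'] start none = PySem.Chars.findFrom cs ['\n'] (k0 : Int) none) :
    pvALoop cs e (cs.length + 2) start true [] = pvPairs cs (pvNl cs (k0 : Int) e) := by
  have h2 : cs.length + 2 = (cs.length + 1) + 1 := rfl
  rw [h2, pvALoop_succ, if_pos hse, hfind]
  simp only [Bool.true_eq_false, false_and, if_false]
  by_cases hbm : PySem.Chars.findFrom cs ['\n'] (k0 : Int) none = -1 ∨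
      e ≤ PySem.Chars.findFrom cs ['\n'] (k0 : Int) none
  · rw [if_pos hbm, pv_nl_nil cs e k0 hk0 hbm]
    simp [pvPairs]
  · rw [if_neg hbm]
    have hne : PySem.Chars.findFrom cs ['\n'] (k0 : Int) none ≠ -1 := fun h => hbm (Or.inl h)
    have hlt : PySem.Chars.findFrom cs ['\n'] (k0 : Int) none < e := by
      rcases lt_or_ge (PySem.Chars.findFrom cs ['\n'] (k0 : Int) none) e with h | h
      · exact h
      · exact absurd (Or.inr h) hbm
    obtain ⟨hkle, hpref, hmin⟩ := PySem.Chars.findFrom_natCast_spec cs ['\n'] k0 hk0 hne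
    set m := PySem.Chars.findFrom cs ['\n'] (k0 : Int) none with hmdef
    have hm0 : 0 ≤ m := le_trans (Int.natCast_nonneg k0) hkle
    have hmget : cs[m.toNat]? = some '\n' := (pv_prefix_drop_iff cs m.toNat).1 hpref
    have hmlen : m.toNat < cs.length := by
      rcases Nat.lt_or_ge m.toNat cs.length with h | h
      · exact h
      · rw [List.getElem?_eq_none_iff.2 h] at hmget; cases hmget
    have hcons : pvNl cs (k0 : Int) e = m :: pvNl cs (m + 1) e :=
      pv_nl_cons cs e k0 m hkle hmlen hmget
        (fun j hj1 hj2 hget => hmin j hj1 hj2 ((pv_prefix_drop_iff cs j).2 hget)) hlt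
    have hm1 : ((m.toNat + 1 : Nat) : Int) = m + 1 := by omega
    have hrec := pv_aLoop_eq_g cs e (cs.length + 1) (m.toNat + 1) [] (by omega)
      (by have := pv_nl_len_le cs ((m.toNat + 1 : Nat) : Int) e; omega)
    rw [hm1] at hrec
    rw [hrec, hcons, pv_pairs_eq_g]
    simp

-- B's whole collection run equals the filtered newline list at the clamped start position
theorem pv_collect_main (cs : List Char) (e start : Int) (k0 : Nat) (hk0 : k0 ≤ cs.length)
    (hfind : PySem.Chars.findFrom cs ['\n'] start none = PySem.Chars.findFrom cs ['\n'] (k0 : Int) none) :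
    pvCollect cs e (cs.length + 2) start = pvNl cs (k0 : Int) e := by
  have h2 : cs.length + 2 = (cs.length + 1) + 1 := rfl
  rw [h2, pvCollect_succ, hfind]
  by_cases hbm : PySem.Chars.findFrom cs ['\n'] (k0 : Int) none = -1 ∨
      e ≤ PySem.Chars.findFrom cs ['\n'] (k0 : Int) none
  · have hnc : ¬(PySem.Chars.findFrom cs ['\n'] (k0 : Int) none ≠ -1 ∧
        PySem.Chars.findFrom cs ['\n'] (k0 : Int) none < e) := by
      rcases hbm with h | h
      · exact fun hc => hc.1 h
      · exact fun hc => absurd hc.2 (not_lt.2 h)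
    rw [if_neg hnc, pv_nl_nil cs e k0 hk0 hbm]
  · have hne : PySem.Chars.findFrom cs ['\n'] (k0 : Int) none ≠ -1 := fun h => hbm (Or.inl h)
    have hlt : PySem.Chars.findFrom cs ['\n'] (k0 : Int) none < e := by
      rcases lt_or_ge (PySem.Chars.findFrom cs ['\n'] (k0 : Int) none) e with h | h
      · exact h
      · exact absurd (Or.inr h) hbm
    obtain ⟨hkle, hpref, hmin⟩ := PySem.Chars.findFrom_natCast_spec cs ['\n'] k0 hk0 hne
    set m := PySem.Chars.findFrom cs ['\n'] (k0 : Int) none with hmdef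
    have hm0 : 0 ≤ m := le_trans (Int.natCast_nonneg k0) hkle
    have hmget : cs[m.toNat]? = some '\n' := (pv_prefix_drop_iff cs m.toNat).1 hpref
    have hmlen : m.toNat < cs.length := by
      rcases Nat.lt_or_ge m.toNat cs.length with h | h
      · exact h
      · rw [List.getElem?_eq_none_iff.2 h] at hmget; cases hmget
    have hcons : pvNl cs (k0 : Int) e = m :: pvNl cs (m + 1) e :=
      pv_nl_cons cs e k0 m hkle hmlen hmget
        (fun j hj1 hj2 hget => hmin j hj1 hj2 ((pv_prefix_drop_iff cs j).2 hget)) hlt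
    have hm1 : ((m.toNat + 1 : Nat) : Int) = m + 1 := by omega
    have hrec := pv_collect_eq_nl cs e (cs.length + 1) (m.toNat + 1) (by omega)
      (by have := pv_nl_len_le cs ((m.toNat + 1 : Nat) : Int) e; omega)
    rw [hm1] at hrec
    rw [if_pos (And.intro hne hlt), hrec, hcons]

-- ===== VERDICT (by name: the statement is the Claim_ definition above) =====
theorem find_split_points_in_code_py_spec : Claim_equal_find_split_points_in_code_py := by
  unfold Claim_equal_find_split_points_in_code_py
  intro text start e _
  unfold Spec_find_split_points_in_code_py find_split_points_in_code_py find_split_points_in_code_py_alt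
  rcases lt_or_ge ((text.toList.length : Int)) start with hbig | hle
  · -- start past the end of the text: find returns -1 immediately on both sides
    have hfind := pv_findFrom_big text.toList ['\n'] start hbig
    have hB : pvCollect text.toList e (text.toList.length + 2) start = [] := by
      have h2 : text.toList.length + 2 = (text.toList.length + 1) + 1 := rfl
      rw [h2, pvCollect_succ, hfind]
      simp
    have hA : pvALoop text.toList e (text.toList.length + 2) start true [] = [] := by
      have h2 : text.toList.length + 2 = (text.toList.length + 1) + 1 := rfl
      rw [h2, pvALoop_succ]
      by_cases hse : start < e
      · rw [if_pos hse, hfind, if_pos (Or.inl rfl)]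
      · rw [if_neg hse]
    rw [hA, hB]
    simp [pvPairs]
  · -- start ≤ len: reduce both sides to the filtered newline list at the clamped position k0
    obtain ⟨k0, hk0len, hfind, hk0ge⟩ :
        ∃ k0 : Nat, k0 ≤ text.toList.length ∧
          PySem.Chars.findFrom text.toList ['\n'] start none
            = PySem.Chars.findFrom text.toList ['\n'] (k0 : Int) none ∧
          (start < 0 ∨ (k0 : Int) = start) := by
      rcases lt_or_ge start 0 with hneg | hpos
      · exact ⟨((text.toList.length : Int) + start).toNat, by omega,
          by simpa using pv_findFrom_clamp text.toList ['\n'] start hneg, Or.inl hneg⟩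
      · exact ⟨start.toNat, by omega, by rw [show ((start.toNat : Nat) : Int) = start by omega],
          Or.inr (by omega)⟩
    rw [pv_collect_main text.toList e start k0 hk0len hfind]
    by_cases hse : start < e
    · exact pv_main text.toList e start k0 hk0len hse hfind
    · -- e ≤ start: A's loop exits at once, and the filtered newline list is empty
      have hnil : pvNl text.toList (k0 : Int) e = [] := by
        rw [List.eq_nil_iff_forall_not_mem]
        intro x hx
        rcases (pv_mem_nl _ _ _ x).1 hx with ⟨j, rfl, _, _, h1, h2⟩
        rcases hk0ge with h | h <;> omega
      have h2 : text.toList.length + 2 = (text.toList.length + 1) + 1 := rfl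
      rw [h2, pvALoop_succ, if_neg hse, hnil]
      simp [pvPairs]
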